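-- pv_equiv track=rewrite | github.com/celinaLind/lets-leet-the-code | Review/Python-Basics/is-everywhere.py | isEverywhere
-- ===== SOURCE A (Python) =====
-- def isEverywhere(nums, val):
--     # Ask Interviewer:
--     # is it every two values or sliding window where one has to be every other value?
--     # Ex. could it be [1,2,2,1] or only [1,2,1,2]
--
--     # start for loop through nums array
--     # go for range of len(nums)-1 to avoid index out of range error
--     # this is because we are using the current value and the next value
--     for i in range(len(nums)-1):
--         # create secondary variable for i+1
--         k = i + 1
--         # if at any point BOTH values are NOT "val" return false
--         if nums[i] != val and nums[k] != val:
--             return False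
--
--     return True
--
--     """
--     CODE FEEDBACK:
--     1. Enhance Code Quality
--         - While your code works correctly, it could benefit from more robust
--         error handling. Consider adding a check for empty input arrays
--     2. Instead of creating a variable k, you can directly use i+1
--     in the if statement
--     """
-- ===== SOURCE B (Python) =====
-- def isEverywhere(nums, val):
--     # Run-length tracking: a streak of 2 consecutive non-val elements means
--     # some adjacent pair misses val.
--     streak = 0
--     for x in nums:
--         if x == val:
--             streak = 0
--         else:
--             streak += 1
--             if streak == 2:
--                 return False
--     return True
-- ===== Notes on version B (the rewrite author's own statement) =====
-- stated objective: alternative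
-- what changed: Replaces the index-based adjacent-pair window test with a single element-wise pass maintaining a run length of consecutive non-val elements, returning False as soon as the run reaches 2.
import Mathlib
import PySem

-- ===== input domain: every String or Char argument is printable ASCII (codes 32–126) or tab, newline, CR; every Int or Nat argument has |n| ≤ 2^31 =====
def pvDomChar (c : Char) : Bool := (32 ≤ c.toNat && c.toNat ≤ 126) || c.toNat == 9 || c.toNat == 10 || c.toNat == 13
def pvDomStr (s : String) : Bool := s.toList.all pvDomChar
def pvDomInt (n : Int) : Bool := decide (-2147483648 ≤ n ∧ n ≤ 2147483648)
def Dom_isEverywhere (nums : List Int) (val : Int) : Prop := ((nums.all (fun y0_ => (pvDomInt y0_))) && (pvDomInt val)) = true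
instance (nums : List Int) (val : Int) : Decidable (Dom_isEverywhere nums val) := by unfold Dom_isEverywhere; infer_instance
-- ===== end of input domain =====

-- B replaces A's index-window test of each adjacent pair by a single element-wise
-- pass with a run-length counter of consecutive non-val elements (alternative decomposition).

-- ===== PORT A =====
-- loop 'for i in range(len(nums)-1)' with early return False; indices i and i+1
-- are always in range, so pyGet? is some; the getD 0 default is never used.
def isEverywhereGoA (nums : List Int) (val : Int) : List Int → Bool
  | [] => true
  | i :: rest =>
    if (PySem.List.pyGet? nums i).getD 0 ≠ val ∧ (PySem.List.pyGet? nums (i + 1)).getD 0 ≠ val then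
      false
    else
      isEverywhereGoA nums val rest

def isEverywhere (nums : List Int) (val : Int) : Bool :=
  isEverywhereGoA nums val (PySem.List.pyRange 0 ((nums.length : Int) - 1) 1)

-- ===== PORT B =====
def isEverywhereGoB (val : Int) : List Int → Int → Bool
  | [], _ => true
  | x :: rest, streak =>
    if x = val then
      isEverywhereGoB val rest 0
    else if streak + 1 = 2 then
      false
    else
      isEverywhereGoB val rest (streak + 1)

def isEverywhere_alt (nums : List Int) (val : Int) : Bool :=
  isEverywhereGoB val nums 0

-- ===== PRECONDITION & SPEC =====
def Spec_isEverywhere (nums : List Int) (val : Int) (out : Bool) : Prop := out = isEverywhere_alt nums val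
instance (nums : List Int) (val : Int) (out : Bool) : Decidable (Spec_isEverywhere nums val out) := by unfold Spec_isEverywhere; infer_instance

-- ===== CLAIM (what is proved, stated in full; the proofs are below) =====
def Claim_equal_isEverywhere : Prop := ∀ (nums : List Int) (val : Int), Dom_isEverywhere nums val → Spec_isEverywhere nums val (isEverywhere nums val)

-- ===== LEMMAS AND PROOFS =====

-- reference structural recursion on the list: every adjacent pair contains val
def pairsOk (val : Int) : List Int → Bool
  | a :: b :: rest => if a ≠ val ∧ b ≠ val then false else pairsOk val (b :: rest)
  | _ => true

theorem goA_eq_pairsOk (nums : List Int) (val : Int) :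
    ∀ (d n : Nat), nums.length - n = d →
      isEverywhereGoA nums val (PySem.List.pyRange (n : Int) ((nums.length : Int) - 1) 1)
        = pairsOk val (nums.drop n) := by
  intro d
  induction d with
  | zero =>
    intro n h
    rw [PySem.List.pyRange_one_eq_nil (by omega)]
    have : nums.drop n = [] := List.drop_eq_nil_iff.mpr (by omega)
    simp [this, isEverywhereGoA, pairsOk]
  | succ d ih =>
    intro n h
    by_cases hlt : (n : Int) < (nums.length : Int) - 1
    · rw [PySem.List.pyRange_one_cons hlt]
      have hn1 : n + 1 < nums.length := by omega
      have hn : n < nums.length := by omega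
      have ha : PySem.List.pyGet? nums (n : Int) = some nums[n] :=
        PySem.List.pyGet?_ofNat nums n hn
      have hb : PySem.List.pyGet? nums ((n : Int) + 1) = some nums[n + 1] := by
        have := PySem.List.pyGet?_ofNat nums (n + 1) hn1
        simpa [Nat.cast_add] using this
      have hdrop : nums.drop n = nums[n] :: nums[n + 1] :: nums.drop (n + 2) := by
        rw [List.drop_eq_getElem_cons hn]
        congr 1
        rw [List.drop_eq_getElem_cons hn1]
      have hdrop1 : nums.drop (n + 1) = nums[n + 1] :: nums.drop (n + 2) := by
        rw [List.drop_eq_getElem_cons hn1]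
      have ihn : isEverywhereGoA nums val
          (PySem.List.pyRange ((n + 1 : Nat) : Int) ((nums.length : Int) - 1) 1)
            = pairsOk val (nums.drop (n + 1)) := ih (n + 1) (by omega)
      rw [hdrop]
      simp only [isEverywhereGoA, ha, hb, Option.getD_some, pairsOk]
      by_cases hc : nums[n] ≠ val ∧ nums[n + 1] ≠ val
      · simp [hc]
      · simp only [if_neg hc]
        rw [show ((n : Int) + 1) = ((n + 1 : Nat) : Int) by push_cast; ring]
        rw [ihn, hdrop1]
    · rw [PySem.List.pyRange_one_eq_nil (by omega)]
      have hlen : nums.length ≤ n + 1 := by omega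
      rcases List.eq_nil_or_concat (nums.drop n) with hd | ⟨ys, y, hys⟩
      · simp [hd, isEverywhereGoA, pairsOk]
      · have hlen2 : (nums.drop n).length ≤ 1 := by
          simp only [List.length_drop]; omega
        have : ys = [] := by
          have := congrArg List.length hys
          simp at this
          exact List.eq_nil_of_length_eq_zero (by omega)
        subst this
        simp at hys
        simp [hys, isEverywhereGoA, pairsOk]

theorem goB_pair (val : Int) (xs : List Int) :
    isEverywhereGoB val xs 0 = pairsOk val xs ∧
      ∀ c : Int, c ≠ val → isEverywhereGoB val xs 1 = pairsOk val (c :: xs) := by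
  induction xs with
  | nil => constructor <;> simp [isEverywhereGoB, pairsOk]
  | cons x t ih =>
    obtain ⟨ih0, ih1⟩ := ih
    constructor
    · by_cases hx : x = val
      · cases t with
        | nil => simp [isEverywhereGoB, hx, pairsOk]
        | cons b r =>
          simp only [isEverywhereGoB, if_pos hx,
            show pairsOk val (x :: b :: r) = pairsOk val (b :: r) from by simp [pairsOk, hx]]
          rw [← ih0]
          simp [isEverywhereGoB]
      · simp only [isEverywhereGoB, if_neg hx]
        norm_num
        exact ih1 x hx
    · intro c hc
      by_cases hx : x = val
      · simp only [isEverywhereGoB, pairsOk, hx]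
        simp only [ne_eq, not_true_eq_false, and_false, if_false]
        cases t with
        | nil => simp [isEverywhereGoB, pairsOk]
        | cons b r => simp [pairsOk, ih0]
      · simp [isEverywhereGoB, hx, pairsOk, hc]

-- ===== VERDICT (by name: the statement is the Claim_ definition above) =====
theorem isEverywhere_spec : Claim_equal_isEverywhere := by
  intro nums val _
  unfold Spec_isEverywhere isEverywhere isEverywhere_alt
  have hA := goA_eq_pairsOk nums val (nums.length - 0) 0 rfl
  simp only [Nat.cast_zero, List.drop_zero] at hA
  rw [hA, (goB_pair val nums).1]
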